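-- pv_equiv track=rewrite | github.com/Helloalpacaa/LeetCode | 3783-mirror-distance-of-an-integer/3783-mirror-distance-of-an-integer.py | mirrorDistance
-- ===== SOURCE A (Python) =====
-- def mirrorDistance(n: int) -> int:
--     original = n
--
--     reverse = 0
--     while n > 0:
--         digit = n % 10
--         reverse = reverse * 10 + digit
--         n //= 10
--
--     return abs(original - reverse)
-- ===== SOURCE B (Python) =====
-- def mirrorDistance(n: int) -> int:
--     if n <= 0:
--         return abs(n)
--     rev = 0
--     for ch in reversed(str(n)):
--         rev = rev * 10 + (ord(ch) - 48)
--     return abs(n - rev)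
-- ===== Notes on version B (the rewrite author's own statement) =====
-- stated objective: alternative
-- what changed: B reverses the number via its decimal string (reversed(str(n)) folded back with Horner rule) instead of A arithmetic modulo-divide digit loop.
import Mathlib
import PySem

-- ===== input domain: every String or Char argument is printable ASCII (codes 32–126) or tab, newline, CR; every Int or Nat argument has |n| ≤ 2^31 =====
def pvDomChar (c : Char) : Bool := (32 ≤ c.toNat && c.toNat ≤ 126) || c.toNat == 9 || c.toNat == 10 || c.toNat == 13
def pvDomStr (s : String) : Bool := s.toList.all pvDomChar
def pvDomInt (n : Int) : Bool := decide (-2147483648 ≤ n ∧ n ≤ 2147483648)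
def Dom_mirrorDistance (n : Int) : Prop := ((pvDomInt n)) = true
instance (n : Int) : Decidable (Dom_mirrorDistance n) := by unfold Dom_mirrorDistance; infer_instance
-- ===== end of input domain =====

-- B replaces the arithmetic digit-reversal loop of A by reversing the decimal string of n
-- and folding it back to a number (objective: alternative; same cost).

-- ===== PORT A =====
-- the 'while n > 0' loop of A: state (n, reverse)
def pvRevLoopA (n acc : Int) : Int :=
  if h : 0 < n then
    pvRevLoopA (PySem.Int.floordiv n 10) (acc * 10 + PySem.Int.mod n 10)
  else acc
termination_by n.toNat
decreasing_by
  rw [PySem.Int.floordiv_eq_ediv_of_pos (by omega : (0:Int) < 10)]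
  omega

def mirrorDistance (n : Int) : Int :=
  |n - pvRevLoopA n 0|

-- ===== PORT B =====
def mirrorDistance_alt (n : Int) : Int :=
  if n ≤ 0 then |n|
  else
    -- for ch in reversed(str(n)): rev = rev*10 + (ord(ch) - 48)
    let rev := ((PySem.Int.toStr n).toList.reverse).foldl
      (fun acc c => acc * 10 + ((c.toNat : Int) - 48)) 0
    |n - rev|

-- ===== PRECONDITION & SPEC =====
def Spec_mirrorDistance (n : Int) (out : Int) : Prop := out = mirrorDistance_alt n
instance (n : Int) (out : Int) : Decidable (Spec_mirrorDistance n out) := by unfold Spec_mirrorDistance; infer_instance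

-- ===== CLAIM (what is proved, stated in full; the proofs are below) =====
def Claim_equal_mirrorDistance : Prop := ∀ (n : Int), Dom_mirrorDistance n → Spec_mirrorDistance n (mirrorDistance n)

-- ===== LEMMAS AND PROOFS =====

-- decimal digits of m, most significant first, by the structural recursion on m / 10
def pvDigits (m : Nat) : List Char :=
  if m < 10 then [Nat.digitChar m]
  else pvDigits (m / 10) ++ [Nat.digitChar (m % 10)]
decreasing_by omega

theorem pvToDigitsCore_eq (f : Nat) : ∀ (n : Nat) (ds : List Char), n < f →
    Nat.toDigitsCore 10 f n ds = pvDigits n ++ ds := by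
  induction f with
  | zero => intro n ds h; omega
  | succ f ih =>
    intro n ds h
    rw [Nat.toDigitsCore]
    by_cases h10 : n / 10 = 0
    · have hn : n < 10 := by omega
      rw [pvDigits, if_pos hn]
      simp [h10, Nat.mod_eq_of_lt hn]
    · have hn : ¬ n < 10 := by omega
      rw [pvDigits, if_neg hn]
      simp only [if_neg h10]
      rw [ih (n / 10) _ (by omega)]
      simp

theorem pvToDigits_eq (n : Nat) : Nat.toDigits 10 n = pvDigits n := by
  rw [Nat.toDigits, pvToDigitsCore_eq (n + 1) n [] (by omega)]
  simp

theorem pvDigitChar_val (d : Nat) (h : d < 10) :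
    ((Nat.digitChar d).toNat : Int) - 48 = (d : Int) := by
  interval_cases d <;> decide

-- A's loop equals B's fold over the reversed digit string
theorem pvRevLoopA_eq_fold (m : Nat) : ∀ (acc : Int), 0 < m →
    pvRevLoopA (m : Int) acc =
      ((pvDigits m).reverse).foldl (fun acc c => acc * 10 + ((c.toNat : Int) - 48)) acc := by
  induction m using Nat.strong_induction_on with
  | _ m ih =>
    intro acc hm
    rw [pvRevLoopA, dif_pos (by exact_mod_cast hm)]
    by_cases h : m < 10
    · rw [pvDigits, if_pos h]
      have h1 : PySem.Int.floordiv (m : Int) 10 = ((m / 10 : Nat) : Int) := PySem.Int.floordiv_natCast m 10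
      have h2 : PySem.Int.mod (m : Int) 10 = ((m % 10 : Nat) : Int) := PySem.Int.mod_natCast m 10
      rw [h1, h2]
      have : m / 10 = 0 := by omega
      rw [this]
      rw [pvRevLoopA, dif_neg (by norm_num)]
      simp [pvDigitChar_val m h, Nat.mod_eq_of_lt h]
    · rw [pvDigits, if_neg h]
      have h1 : PySem.Int.floordiv (m : Int) 10 = ((m / 10 : Nat) : Int) := PySem.Int.floordiv_natCast m 10
      have h2 : PySem.Int.mod (m : Int) 10 = ((m % 10 : Nat) : Int) := PySem.Int.mod_natCast m 10
      rw [h1, h2, ih (m / 10) (by omega) _ (by omega)]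
      simp [pvDigitChar_val (m % 10) (by omega)]

theorem pvRevLoopA_nonpos (n : Int) (h : ¬ 0 < n) : pvRevLoopA n 0 = 0 := by
  rw [pvRevLoopA, dif_neg h]

-- ===== VERDICT (by name: the statement is the Claim_ definition above) =====
theorem mirrorDistance_spec : Claim_equal_mirrorDistance := by
  intro n _
  unfold Spec_mirrorDistance mirrorDistance mirrorDistance_alt
  by_cases h : n ≤ 0
  · rw [if_pos h, pvRevLoopA_nonpos n (by omega)]
    simp
  · rw [if_neg h]
    have hn : 0 < n := by omega
    have hm : n = ((n.toNat : Nat) : Int) := by omega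
    simp only [PySem.Int.toList_toStr, PySem.Int.toChars, if_neg (by omega : ¬ n < 0)]
    rw [pvToDigits_eq]
    rw [hm, pvRevLoopA_eq_fold n.toNat 0 (by omega)]
    simp only [Int.toNat_natCast]
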